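-- pv_equiv track=rewrite | github.com/aroberge/reeborg | src/python/preprocess.py | get_unique_variable_names
-- ===== SOURCE A (Python) =====
-- def get_unique_variable_names(text, nb):
--     base_name = 'ITERATION_VARIABLE'
--     var_names = []
--     i = 0
--     j = 0
--     while j < nb:
--         tentative_name = base_name + str(i)
--         if text.count(tentative_name) == 0:
--             var_names.append(tentative_name)
--             j += 1
--         i += 1
--     return var_names
-- ===== SOURCE B (Python) =====
-- def _digit_free_names(runs, base, nb):
--     # emit names base+str(i) for increasing i, skipping i whose decimal
--     # string is a prefix of some recorded suffix (i.e. base+str(i) occurs in text)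
--     var_names = []
--     i = 0
--     while len(var_names) < nb:
--         s = str(i)
--         if not any(run.startswith(s) for run in runs):
--             var_names.append(base + s)
--         i += 1
--     return var_names
--
--
-- def get_unique_variable_names(text, nb):
--     base = 'ITERATION_VARIABLE'
--     L = len(base)
--     # index the text once: record, for every occurrence of the base name,
--     # the suffix of the text that follows it
--     runs = []
--     for p in range(len(text)):
--         if text.startswith(base, p):
--             runs.append(text[p + L:])
--     return _digit_free_names(runs, base, nb)
-- ===== Notes on version B (the rewrite author's own statement) =====
-- stated objective: faster
-- what changed: Instead of rescanning the whole text with text.count for every candidate index, B scans the text once to record the suffix after each occurrence of 'ITERATION_VARIABLE' and then tests each candidate str(i) only against those (typically zero or few) recorded suffixes.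
import Mathlib
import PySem

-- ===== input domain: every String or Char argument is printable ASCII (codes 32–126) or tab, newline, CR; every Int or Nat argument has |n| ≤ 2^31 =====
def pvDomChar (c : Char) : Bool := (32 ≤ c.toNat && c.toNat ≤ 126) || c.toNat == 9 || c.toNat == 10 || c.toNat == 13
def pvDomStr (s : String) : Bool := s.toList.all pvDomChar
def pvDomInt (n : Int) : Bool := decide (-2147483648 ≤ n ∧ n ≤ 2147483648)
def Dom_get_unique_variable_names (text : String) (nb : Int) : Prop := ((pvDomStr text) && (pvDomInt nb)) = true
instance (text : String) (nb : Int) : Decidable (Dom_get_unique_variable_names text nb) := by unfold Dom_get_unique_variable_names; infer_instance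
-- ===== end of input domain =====

-- B indexes the text once (suffix after each occurrence of the base name) instead of
-- rescanning the whole text with text.count for every candidate index; return values are equal.
-- Both while-loops are totalized with the same (provably sufficient in practice) fuel bound.

-- shared totalization fuel for the unbounded 'while j < nb' loop of both programs
def pvFuel (text : String) (nb : Int) : Nat :=
  nb.toNat + (text.toList.length + 1) * (text.toList.length + 1) + 1

-- ===== PORT A =====
-- the while loop of A: state (i, j, var_names)
def pvLoopA (text : String) (nb : Int) : Nat → Int → Int → List String → List String
  | 0, _, _, acc => acc
  | f + 1, i, j, acc =>
    if j < nb then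
      let tentative := "ITERATION_VARIABLE" ++ PySem.Int.toStr i
      if PySem.Str.count text tentative = 0 then
        pvLoopA text nb f (i + 1) (j + 1) (acc ++ [tentative])
      else
        pvLoopA text nb f (i + 1) j acc
    else acc

def get_unique_variable_names (text : String) (nb : Int) : List String :=
  pvLoopA text nb (pvFuel text nb) 0 0 []

-- ===== PORT B =====
-- _digit_free_names of Source B: while len(var_names) < nb over candidate index i
def pvLoopB (runs : List (List Char)) (nb : Int) : Nat → Int → List String → List String
  | 0, _, acc => acc
  | f + 1, i, acc =>
    if (acc.length : Int) < nb then
      let s := PySem.Int.toStr i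
      if runs.any (fun run => PySem.Chars.startswith run s.toList) then
        pvLoopB runs nb f (i + 1) acc
      else
        pvLoopB runs nb f (i + 1) (acc ++ ["ITERATION_VARIABLE" ++ s])
    else acc

def get_unique_variable_names_alt (text : String) (nb : Int) : List String :=
  let chars := text.toList
  let baseL := "ITERATION_VARIABLE".toList
  let runs := (List.range chars.length).foldl
    (fun acc p => if PySem.Chars.startswith (chars.drop p) baseL then acc ++ [chars.drop (p + 18)] else acc) []
  pvLoopB runs nb (pvFuel text nb) 0 []

-- ===== PRECONDITION & SPEC =====
def Spec_get_unique_variable_names (text : String) (nb : Int) (out : List String) : Prop := out = get_unique_variable_names_alt text nb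
instance (text : String) (nb : Int) (out : List String) : Decidable (Spec_get_unique_variable_names text nb out) := by unfold Spec_get_unique_variable_names; infer_instance

-- ===== CLAIM (what is proved, stated in full; the proofs are below) =====
def Claim_equal_get_unique_variable_names : Prop := ∀ (text : String) (nb : Int), Dom_get_unique_variable_names text nb → Spec_get_unique_variable_names text nb (get_unique_variable_names text nb)

-- ===== LEMMAS AND PROOFS =====

-- (a ++ b) is a prefix of l iff a is, and b is a prefix of what follows a
theorem pv_append_prefix_iff {α : Type} (a b l : List α) :
    (a ++ b) <+: l ↔ a <+: l ∧ b <+: l.drop a.length := by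
  constructor
  · rintro ⟨t, rfl⟩
    refine ⟨⟨b ++ t, by simp⟩, ?_⟩
    rw [List.append_assoc, List.drop_append_of_le_length (by simp), List.drop_length]
    exact List.prefix_append b t
  · rintro ⟨⟨t, rfl⟩, hb⟩
    rw [List.drop_append_of_le_length (by simp), List.drop_length] at hb
    obtain ⟨u, rfl⟩ := hb
    exact ⟨u, by simp⟩

theorem pv_count_go_ge (sub : List Char) : ∀ (fuel : Nat) (l : List Char) (acc : Nat),
    acc ≤ PySem.Chars.count.go sub fuel l acc := by
  intro fuel
  induction fuel with
  | zero => intro l acc; cases l <;> simp [PySem.Chars.count.go]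
  | succ f ih =>
    intro l acc
    cases l with
    | nil => simp [PySem.Chars.count.go]
    | cons h t =>
      simp only [PySem.Chars.count.go]
      split
      · exact le_trans (Nat.le_succ acc) (ih _ _)
      · exact ih _ _

theorem pv_count_go_eq_acc_iff (sub : List Char) (hsub : sub ≠ []) :
    ∀ (fuel : Nat) (l : List Char) (acc : Nat), l.length ≤ fuel →
    (PySem.Chars.count.go sub fuel l acc = acc ↔ ¬ sub <:+: l) := by
  intro fuel
  induction fuel with
  | zero =>
    intro l acc hl
    have : l = [] := List.length_eq_zero_iff.mp (Nat.le_zero.mp hl)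
    subst this
    simp [PySem.Chars.count.go, List.infix_nil, hsub]
  | succ f ih =>
    intro l acc hl
    cases l with
    | nil => simp [PySem.Chars.count.go, List.infix_nil, hsub]
    | cons h t =>
      simp only [PySem.Chars.count.go]
      split
      · rename_i hpre
        constructor
        · intro heq
          have := pv_count_go_ge sub f (List.drop sub.length (h :: t)) (acc + 1)
          omega
        · intro hno
          exact absurd (List.IsPrefix.isInfix (List.isPrefixOf_iff_prefix.mp hpre)) hno
      · rename_i hpre
        have hpre' : ¬ sub <+: (h :: t) := fun hp =>
          hpre (List.isPrefixOf_iff_prefix.mpr hp)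
        rw [ih t acc (by simpa using Nat.le_of_succ_le_succ hl)]
        rw [List.infix_cons_iff]
        tauto

theorem pv_count_eq_zero_iff (s sub : List Char) (hsub : sub ≠ []) :
    PySem.Chars.count s sub = 0 ↔ ¬ sub <:+: s := by
  unfold PySem.Chars.count
  rw [if_neg (by simpa [List.isEmpty_iff] using hsub)]
  exact pv_count_go_eq_acc_iff sub hsub s.length s 0 le_rfl

-- membership in the runs list built by port B
theorem pv_runs_mem (chars : List Char) (baseL : List Char) (r : List Char) :
    r ∈ (List.range chars.length).foldl
      (fun acc p => if PySem.Chars.startswith (chars.drop p) baseL then acc ++ [chars.drop (p + 18)] else acc) [] ↔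
    ∃ p < chars.length, baseL <+: chars.drop p ∧ r = chars.drop (p + 18) := by
  rw [PySem.List.foldl_append_if]
  simp only [List.mem_append, List.mem_nil_iff, false_or, List.mem_map, List.mem_filter,
    List.mem_range, PySem.Chars.startswith, List.isPrefixOf_iff_prefix]
  constructor
  · rintro ⟨p, ⟨hp, hpre⟩, rfl⟩; exact ⟨p, hp, hpre, rfl⟩
  · rintro ⟨p, hp, hpre, rfl⟩; exact ⟨p, ⟨hp, hpre⟩, rfl⟩

-- the two per-candidate tests agree
theorem pv_test_iff (text : String) (i : Int) :
    (PySem.Str.count text ("ITERATION_VARIABLE" ++ PySem.Int.toStr i) = 0) ↔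
    ((List.range text.toList.length).foldl
      (fun acc p => if PySem.Chars.startswith (text.toList.drop p) "ITERATION_VARIABLE".toList then acc ++ [text.toList.drop (p + 18)] else acc) []).any
        (fun run => PySem.Chars.startswith run (PySem.Int.toStr i).toList) = false := by
  rw [PySem.Str.count_eq]
  have hname : ("ITERATION_VARIABLE" ++ PySem.Int.toStr i).toList
      = "ITERATION_VARIABLE".toList ++ (PySem.Int.toStr i).toList := by
    simp
  rw [hname]
  rw [pv_count_eq_zero_iff _ _ (by simp)]
  rw [List.any_eq_false]
  constructor
  · intro hno run hrun
    rw [pv_runs_mem] at hrun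
    obtain ⟨p, hp, hpre, rfl⟩ := hrun
    simp only [PySem.Chars.startswith, List.isPrefixOf_iff_prefix]
    intro hsp
    apply hno
    have : ("ITERATION_VARIABLE".toList ++ (PySem.Int.toStr i).toList) <+: text.toList.drop p := by
      rw [pv_append_prefix_iff, List.drop_drop]
      exact ⟨hpre, by simpa [Nat.add_comm] using hsp⟩
    exact this.isInfix.trans (List.drop_suffix p text.toList).isInfix
  · intro hall hinf
    obtain ⟨pre, suf, heq⟩ := hinf
    have hdrop : ("ITERATION_VARIABLE".toList ++ (PySem.Int.toStr i).toList) <+: text.toList.drop pre.length := by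
      rw [← heq, List.append_assoc, List.drop_left]
      exact ⟨suf, rfl⟩
    rw [pv_append_prefix_iff] at hdrop
    obtain ⟨hbase, hsuf⟩ := hdrop
    have hplen : pre.length < text.toList.length := by
      by_contra hge
      rw [List.drop_eq_nil_of_le (Nat.le_of_not_lt hge)] at hbase
      exact absurd (List.prefix_nil.mp hbase) (by simp)
    have hb := hall (text.toList.drop (pre.length + 18))
      (by rw [pv_runs_mem]; exact ⟨pre.length, hplen, hbase, rfl⟩)
    simp only [PySem.Chars.startswith, List.isPrefixOf_iff_prefix] at hb
    exact hb (by simpa [List.drop_drop, Nat.add_comm] using hsuf)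

-- aligned induction over the shared fuel: A's counter j mirrors B's len(var_names)
theorem pv_loops_eq (text : String) (nb : Int) :
    ∀ (fuel : Nat) (i : Int) (acc : List String),
    pvLoopA text nb fuel i (acc.length : Int) acc =
      pvLoopB ((List.range text.toList.length).foldl
        (fun acc p => if PySem.Chars.startswith (text.toList.drop p) "ITERATION_VARIABLE".toList then acc ++ [text.toList.drop (p + 18)] else acc) [])
        nb fuel i acc := by
  intro fuel
  induction fuel with
  | zero => intro i acc; simp [pvLoopA, pvLoopB]
  | succ f ih =>
    intro i acc
    simp only [pvLoopA, pvLoopB]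
    split
    · by_cases htest : PySem.Str.count text ("ITERATION_VARIABLE" ++ PySem.Int.toStr i) = 0
      · rw [if_pos htest, if_neg (by rw [(pv_test_iff text i).mp htest]; simp)]
        have := ih (i + 1) (acc ++ ["ITERATION_VARIABLE" ++ PySem.Int.toStr i])
        simpa [Nat.cast_add] using this
      · rw [if_neg htest,
          if_pos (Bool.ne_false_iff.mp (fun h => htest ((pv_test_iff text i).mpr h)))]
        exact ih (i + 1) acc
    · rfl

-- ===== VERDICT (by name: the statement is the Claim_ definition above) =====
theorem get_unique_variable_names_spec : Claim_equal_get_unique_variable_names := by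
  intro text nb _
  unfold Spec_get_unique_variable_names get_unique_variable_names get_unique_variable_names_alt
  simpa using pv_loops_eq text nb (pvFuel text nb) 0 []
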